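-- pv_equiv track=rewrite | github.com/alanctprado/tp-mda | regression_view.py | separate_by_category
-- ===== SOURCE A (Python) =====
-- def separate_by_category(entries):
--     separated = {}
--     for x, y in entries.values():
--         category = (y // 100) * 100
--         if category not in separated:
--             separated[category] = []
--         separated[category].append((x, y))
--     return separated
-- ===== SOURCE B (Python) =====
-- def separate_by_category(entries):
--     # Alternative decomposition: collect the categories in first-appearance
--     # order, then build each bucket with one filtering pass per category.
--     vals = [(x, y) for x, y in entries.values()]
--     cats = []
--     for _, y in vals:
--         c = (y // 100) * 100
--         if c not in cats:
--             cats.append(c)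
--     return {c: [(x, y) for x, y in vals if (y // 100) * 100 == c] for c in cats}
-- ===== Notes on version B (the rewrite author's own statement) =====
-- stated objective: alternative
-- what changed: Instead of building the buckets incrementally in one dict-append pass, B first collects the distinct category keys in first-appearance order and then emits each bucket by an independent filtering pass over the values.
import Mathlib
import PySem

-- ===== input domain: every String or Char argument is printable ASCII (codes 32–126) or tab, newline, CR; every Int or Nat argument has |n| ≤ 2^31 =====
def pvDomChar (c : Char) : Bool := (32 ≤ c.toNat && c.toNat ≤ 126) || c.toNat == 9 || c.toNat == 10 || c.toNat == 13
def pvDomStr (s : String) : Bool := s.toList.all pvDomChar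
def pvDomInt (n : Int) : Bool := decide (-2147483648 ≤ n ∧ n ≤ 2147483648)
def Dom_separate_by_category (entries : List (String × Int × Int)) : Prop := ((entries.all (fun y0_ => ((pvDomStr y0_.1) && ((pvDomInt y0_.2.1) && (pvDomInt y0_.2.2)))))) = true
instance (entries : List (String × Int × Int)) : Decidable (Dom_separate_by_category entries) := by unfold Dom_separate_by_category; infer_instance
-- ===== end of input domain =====

-- B replaces A's incremental dict-append grouping by a two-phase scheme (collect category
-- keys in first-appearance order, then one filtering pass per category): an alternative
-- decomposition of similar cost, not claimed faster.


-- ===== PORT A =====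
def separate_by_category (entries : List (String × Int × Int)) : List (Int × List (Int × Int)) :=
  (entries.map Prod.snd).foldl
    (fun separated xy =>
      let category := PySem.Int.floordiv xy.2 100 * 100
      let separated := if separated.contains category then separated else separated.insert category []
      separated.modify category [] (fun l => l ++ [xy]))
    PySem.Dict.empty |>.items

-- ===== PORT B =====
def separate_by_category_alt (entries : List (String × Int × Int)) : List (Int × List (Int × Int)) :=
  let vals := entries.map Prod.snd
  let cats := vals.foldl
    (fun cats xy =>
      let c := PySem.Int.floordiv xy.2 100 * 100
      if cats.contains c then cats else cats ++ [c]) []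
  cats.map (fun c => (c, vals.filter (fun xy => PySem.Int.floordiv xy.2 100 * 100 == c)))

-- ===== PRECONDITION & SPEC =====
-- entries models a Python dict: an association list with duplicate keys does not
-- correspond to any dict A can be called with, so Pre_ requires the keys distinct.
def Pre_separate_by_category (entries : List (String × Int × Int)) : Prop :=
  (entries.map Prod.fst).Nodup
instance (entries : List (String × Int × Int)) : Decidable (Pre_separate_by_category entries) := by unfold Pre_separate_by_category; infer_instance
def pvWitness_separate_by_category : (List (String × Int × Int)) := [("a", 1, 150), ("b", 2, -3)]
def Spec_separate_by_category (entries : List (String × Int × Int)) (out : List (Int × List (Int × Int))) : Prop := out = separate_by_category_alt entries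
instance (entries : List (String × Int × Int)) (out : List (Int × List (Int × Int))) : Decidable (Spec_separate_by_category entries out) := by unfold Spec_separate_by_category; infer_instance

-- ===== CLAIM (what is proved, stated in full; the proofs are below) =====
def Claim_equal_separate_by_category : Prop := ∀ (entries : List (String × Int × Int)), Dom_separate_by_category entries → Pre_separate_by_category entries → Spec_separate_by_category entries (separate_by_category entries)

-- ===== LEMMAS AND PROOFS =====

-- A's loop body (conditional fresh insert, then append) is one `modify` per element.
theorem sbc_step_eq (d : PySem.Dict Int (List (Int × Int))) (xy : Int × Int) :
    (if d.contains (PySem.Int.floordiv xy.2 100 * 100) then d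
     else d.insert (PySem.Int.floordiv xy.2 100 * 100) []).modify
        (PySem.Int.floordiv xy.2 100 * 100) [] (fun l => l ++ [xy])
    = d.modify (PySem.Int.floordiv xy.2 100 * 100) [] (fun l => l ++ [xy]) := by
  set c := PySem.Int.floordiv xy.2 100 * 100 with hc
  by_cases h : d.contains c
  · simp [h]
  · simp only [h, if_neg, Bool.not_eq_true, ite_false]
    simp [PySem.Dict.modify, PySem.Dict.insert_insert_self, PySem.Dict.getD_insert_self,
      PySem.Dict.getD_of_not_contains d [] (by simpa using h)]

theorem separate_by_category_spec : Claim_equal_separate_by_category := by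
  intro entries _ _
  unfold Spec_separate_by_category separate_by_category separate_by_category_alt
  simp only []
  set vals := entries.map Prod.snd with hvals
  set key : Int × Int → Int := fun xy => PySem.Int.floordiv xy.2 100 * 100 with hkey
  -- rewrite A's fold step via sbc_step_eq
  have hstep :
      (fun (separated : PySem.Dict Int (List (Int × Int))) (xy : Int × Int) =>
        let category := PySem.Int.floordiv xy.2 100 * 100
        let separated := if separated.contains category then separated else separated.insert category []
        separated.modify category [] (fun l => l ++ [xy]))
      = fun separated xy => separated.modify (key xy) [] (fun l => l ++ [xy]) := by
    funext d xy
    exact sbc_step_eq d xy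
  rw [hstep]
  -- the dict built by the modify-fold
  set F := vals.foldl (fun d xy => d.modify (key xy) [] (fun l => l ++ [xy])) PySem.Dict.empty with hF
  have hnodup : F.keys.Nodup := by
    rw [hF]
    exact PySem.Dict.nodup_keys_foldl_modify_key vals key []
      (fun _ xy l => l ++ [xy]) PySem.Dict.empty PySem.Dict.nodup_keys_empty
  have hkeys : F.keys = PySem.Set.ofList (vals.map key) := by
    rw [hF]
    rw [PySem.Dict.keys_foldl_modify_key vals key [] (fun _ xy l => l ++ [xy]) PySem.Dict.empty]
    rfl
  have hgetD : ∀ c : Int, F.getD c [] = vals.filter (fun xy => key xy == c) := by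
    intro c
    have hmap : F = (vals.map (fun p => (key p, p))).foldl
        (fun d q => d.modify q.1 [] (fun l => l ++ [q.2])) PySem.Dict.empty := by
      rw [hF]
      simp only [List.foldl_map]
    rw [hmap, PySem.Dict.getD_foldl_modify_append]
    simp [List.filter_map, Function.comp_def]
  have hcats : vals.foldl
      (fun (cats : List Int) xy =>
        if cats.contains (PySem.Int.floordiv xy.2 100 * 100) then cats
        else cats ++ [PySem.Int.floordiv xy.2 100 * 100]) []
      = PySem.Set.ofList (vals.map key) := by
    simp only [PySem.Set.ofList_eq_foldl, List.foldl_map]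
    rfl
  rw [hcats]
  rw [PySem.Dict.items_eq_map_keys F hnodup [], hkeys]
  exact List.map_congr_left (fun c _ => by rw [hgetD c])
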